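-- pv_equiv track=rewrite | github.com/t-shah02/aoc-2024 | day2/sol.py | split_reports
-- ===== SOURCE A (Python) =====
-- def is_report_safe(report: list[int]) -> bool:
--     is_increasing = True
--     is_decreasing = True
--
--     for i in range(1, len(report)):
--         if report[i] < report[i-1]:
--             is_increasing = False
--             break
--
--     if not is_increasing:
--         for i in range(1, len(report)):
--             if report[i] > report[i-1]:
--                 is_decreasing = False
--                 break
--
--     if not is_increasing and not is_decreasing:
--         return False
--
--     for i in range(1, len(report)):
--         level_diff = abs(report[i] - report[i-1])
--         if level_diff not in range(1, 4):
--             return False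
--
--     return True
--
-- def split_reports(reports: list[list[int]]) -> tuple[list[list[int]], list[list[int]]]:
--     safe_reports: list[list[int]] = []
--     unsafe_reports: list[list[int]] = []
--
--     for report in reports:
--         if is_report_safe(report):
--             safe_reports.append(report)
--         else:
--             unsafe_reports.append(report)
--
--     return safe_reports, unsafe_reports
-- ===== SOURCE B (Python) =====
-- def is_report_safe(report: list[int]) -> bool:
--     diffs = [b - a for a, b in zip(report, report[1:])]
--     return all(1 <= d <= 3 for d in diffs) or all(-3 <= d <= -1 for d in diffs)
--
-- def split_reports(reports: list[list[int]]) -> tuple[list[list[int]], list[list[int]]]: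
--     safe_reports = [r for r in reports if is_report_safe(r)]
--     unsafe_reports = [r for r in reports if not is_report_safe(r)]
--     return safe_reports, unsafe_reports
-- ===== Notes on version B (the rewrite author's own statement) =====
-- stated objective: simpler
-- what changed: is_report_safe's three separate index loops (increasing flag with break, decreasing flag with break, abs-diff bounds pass) are collapsed into one predicate over the list of consecutive differences (all in [1,3] or all in [-3,-1]), and the explicit append loop in split_reports becomes two order-preserving filters.
import Mathlib
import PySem

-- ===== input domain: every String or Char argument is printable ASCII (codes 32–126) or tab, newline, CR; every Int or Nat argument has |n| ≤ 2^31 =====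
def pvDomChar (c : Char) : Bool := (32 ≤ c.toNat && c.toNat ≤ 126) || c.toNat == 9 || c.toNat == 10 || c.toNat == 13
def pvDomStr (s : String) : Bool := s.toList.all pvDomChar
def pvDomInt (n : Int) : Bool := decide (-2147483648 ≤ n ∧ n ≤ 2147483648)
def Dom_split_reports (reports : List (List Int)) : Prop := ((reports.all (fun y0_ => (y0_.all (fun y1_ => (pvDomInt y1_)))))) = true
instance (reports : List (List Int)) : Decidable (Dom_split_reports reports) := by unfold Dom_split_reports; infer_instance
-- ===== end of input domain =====

-- B collapses A's three index loops (increasing flag, decreasing flag, abs-diff bounds) into one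
-- predicate over the consecutive differences, and replaces the append loop by two filters (simpler; not faster).

-- ===== PORT A =====
-- A's 'for i in range(1, len(report)): if f(report[i-1], report[i]): flag = False; break'
def pvPairLoop (f : Int → Int → Bool) (r : List Int) : List Int → Bool
  | [] => true
  | i :: rest =>
      if f (PySem.List.pyGetD r (i-1) 0) (PySem.List.pyGetD r i 0) then false
      else pvPairLoop f r rest

def is_report_safe (report : List Int) : Bool :=
  let rng := PySem.List.pyRange 1 (PySem.List.len report) 1
  let is_increasing := pvPairLoop (fun a b => decide (b < a)) report rng
  let is_decreasing := if !is_increasing then pvPairLoop (fun a b => decide (a < b)) report rng else true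
  if !is_increasing && !is_decreasing then false
  else pvPairLoop (fun a b => !(decide (1 ≤ |b - a|) && decide (|b - a| < 4))) report rng

def split_reports (reports : List (List Int)) : List (List Int) × List (List Int) :=
  reports.foldl
    (fun acc report =>
      if is_report_safe report then (acc.1 ++ [report], acc.2) else (acc.1, acc.2 ++ [report]))
    ([], [])

-- ===== PORT B =====
def is_report_safe_alt (report : List Int) : Bool :=
  let diffs := (report.zip report.tail).map (fun p => p.2 - p.1)
  diffs.all (fun d => decide (1 ≤ d) && decide (d ≤ 3)) ||
    diffs.all (fun d => decide (-3 ≤ d) && decide (d ≤ -1))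

def split_reports_alt (reports : List (List Int)) : List (List Int) × List (List Int) :=
  (reports.filter is_report_safe_alt, reports.filter (fun r => !is_report_safe_alt r))

-- ===== PRECONDITION & SPEC =====
def Spec_split_reports (reports : List (List Int)) (out : List (List Int) × List (List Int)) : Prop := out = split_reports_alt reports
instance (reports : List (List Int)) (out : List (List Int) × List (List Int)) : Decidable (Spec_split_reports reports out) := by unfold Spec_split_reports; infer_instance

-- ===== CLAIM (what is proved, stated in full; the proofs are below) =====
def Claim_equal_split_reports : Prop := ∀ (reports : List (List Int)), Dom_split_reports reports → Spec_split_reports reports (split_reports reports)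

-- ===== LEMMAS AND PROOFS =====

-- the break-loop over a pure predicate is the same as `all` of its negation
lemma pvPairLoop_eq_all (f : Int → Int → Bool) (r : List Int) (l : List Int) :
    pvPairLoop f r l = l.all (fun i => !f (PySem.List.pyGetD r (i-1) 0) (PySem.List.pyGetD r i 0)) := by
  induction l with
  | nil => rfl
  | cons i rest ih =>
    simp only [pvPairLoop, List.all_cons, ih]
    split_ifs with h <;> simp [h]

-- A's index loop over range(1, len r) visits exactly the adjacent pairs of r
lemma range_all_eq_zip_all (f : Int → Int → Bool) (r : List Int) :
    ((PySem.List.pyRange 1 (PySem.List.len r) 1).all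
       (fun i => !f (PySem.List.pyGetD r (i-1) 0) (PySem.List.pyGetD r i 0)))
    = (r.zip r.tail).all (fun q => !f q.1 q.2) := by
  apply Bool.coe_iff_coe.mp
  simp only [List.all_eq_true, PySem.List.mem_pyRange_one, PySem.List.len_eq, Bool.not_eq_eq_eq_not,
    Bool.not_true]
  constructor
  · intro h q hq'
    obtain ⟨k, hk, hq⟩ := List.mem_iff_getElem.mp hq'
    have hk' : k + 1 < r.length := by simp [List.length_tail] at hk; omega
    have h1 := h ((k : Int) + 1) ⟨by omega, by omega⟩
    have hget : (r.zip r.tail)[k] = (r[k], r[k+1]) := by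
      simp [List.getElem_zip, List.getElem_tail]
    rw [← hq, hget]
    have e1 : ((k : Int) + 1) - 1 = (k : Int) := by ring
    rw [e1] at h1
    have c1 : PySem.List.pyGetD r (k : Int) 0 = r[k] := by
      rw [PySem.List.pyGetD_natCast]; exact List.getD_eq_getElem _ _ (by omega)
    have c2 : PySem.List.pyGetD r ((k : Int) + 1) 0 = r[k+1] := by
      have h3 : ((k : Int) + 1) = ((k + 1 : Nat) : Int) := by push_cast; ring
      rw [h3, PySem.List.pyGetD_natCast]; exact List.getD_eq_getElem _ _ hk'
    rw [c1, c2] at h1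
    exact h1
  · intro h i hi
    obtain ⟨h1, h2⟩ := hi
    set k : Nat := (i - 1).toNat with hkdef
    have hik : i = (k : Int) + 1 := by omega
    have hk' : k + 1 < r.length := by omega
    have hzl : k < (r.zip r.tail).length := by simp [List.length_tail]; omega
    have hmem : (r[k], r[k+1]) ∈ r.zip r.tail := by
      have hget : (r.zip r.tail)[k] = (r[k], r[k+1]) := by
        simp [List.getElem_zip, List.getElem_tail]
      rw [← hget]; exact List.getElem_mem hzl
    have hf := h _ hmem
    rw [hik]
    have e1 : ((k : Int) + 1) - 1 = (k : Int) := by ring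
    rw [e1]
    have c1 : PySem.List.pyGetD r (k : Int) 0 = r[k] := by
      rw [PySem.List.pyGetD_natCast]; exact List.getD_eq_getElem _ _ (by omega)
    have c2 : PySem.List.pyGetD r ((k : Int) + 1) 0 = r[k+1] := by
      have h3 : ((k : Int) + 1) = ((k + 1 : Nat) : Int) := by push_cast; ring
      rw [h3, PySem.List.pyGetD_natCast]; exact List.getD_eq_getElem _ _ hk'
    rw [c1, c2]
    exact hf

lemma pvPairLoop_range (f : Int → Int → Bool) (r : List Int) :
    pvPairLoop f r (PySem.List.pyRange 1 (PySem.List.len r) 1)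
    = (r.zip r.tail).all (fun q => !f q.1 q.2) := by
  rw [pvPairLoop_eq_all, range_all_eq_zip_all]

lemma safe_eq (r : List Int) : is_report_safe r = is_report_safe_alt r := by
  unfold is_report_safe is_report_safe_alt
  simp only [pvPairLoop_range, List.all_map, Function.comp_def]
  generalize r.zip r.tail = L
  by_cases hI : (∀ q ∈ L, ¬ q.2 < q.1)
  · have hIb : (L.all fun q => !decide (q.2 < q.1)) = true := by
      simp only [List.all_eq_true]; intro q hq; simp [hI q hq]
    rw [hIb]
    simp only [Bool.not_true, Bool.false_and, Bool.false_eq_true, if_false]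
    apply Bool.coe_iff_coe.mp
    simp only [List.all_eq_true, Bool.or_eq_true, Bool.not_not, Bool.and_eq_true, decide_eq_true_eq]
    constructor
    · intro h; left; intro q hq
      have h1 := h q hq; have h2 := hI q hq
      rcases abs_cases (q.2 - q.1) with ⟨he, h0⟩ | ⟨he, h0⟩ <;> omega
    · rintro (h | h) q hq
      · have h1 := h q hq
        rcases abs_cases (q.2 - q.1) with ⟨he, h0⟩ | ⟨he, h0⟩ <;> omega
      · have h1 := h q hq; have h2 := hI q hq
        rcases abs_cases (q.2 - q.1) with ⟨he, h0⟩ | ⟨he, h0⟩ <;> omega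
  · have hIb : (L.all fun q => !decide (q.2 < q.1)) = false := by
      rw [List.all_eq_false]
      push_neg at hI; obtain ⟨q, hq, hlt⟩ := hI
      exact ⟨q, hq, by simp [hlt]⟩
    obtain ⟨q0, hq0, hlt0⟩ : ∃ q ∈ L, q.2 < q.1 := by push_neg at hI; exact hI
    rw [hIb]
    simp only [Bool.not_false, Bool.true_and, if_true]
    by_cases hD : (∀ q ∈ L, ¬ q.1 < q.2)
    · have hDb : (L.all fun q => !decide (q.1 < q.2)) = true := by
        simp only [List.all_eq_true]; intro q hq; simp [hD q hq]
      rw [hDb]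
      simp only [Bool.not_true, Bool.false_eq_true, if_false]
      apply Bool.coe_iff_coe.mp
      simp only [List.all_eq_true, Bool.or_eq_true, Bool.not_not, Bool.and_eq_true, decide_eq_true_eq]
      constructor
      · intro h; right; intro q hq
        have h1 := h q hq; have h2 := hD q hq
        rcases abs_cases (q.2 - q.1) with ⟨he, h0⟩ | ⟨he, h0⟩ <;> omega
      · rintro (h | h) q hq
        · exfalso; have h1 := h q0 hq0; omega
        · have h1 := h q hq; have h2 := hD q hq
          rcases abs_cases (q.2 - q.1) with ⟨he, h0⟩ | ⟨he, h0⟩ <;> omega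
    · have hDb : (L.all fun q => !decide (q.1 < q.2)) = false := by
        rw [List.all_eq_false]
        push_neg at hD; obtain ⟨q, hq, hlt⟩ := hD
        exact ⟨q, hq, by simp [hlt]⟩
      obtain ⟨q1, hq1, hlt1⟩ : ∃ q ∈ L, q.1 < q.2 := by push_neg at hD; exact hD
      rw [hDb]
      simp only [Bool.not_false, if_true]
      apply Bool.coe_iff_coe.mp
      simp only [Bool.false_eq_true, false_iff, Bool.or_eq_true, List.all_eq_true, Bool.and_eq_true,
        decide_eq_true_eq, not_or, not_forall]
      constructor
      · exact ⟨q0, ⟨hq0, by rcases abs_cases (q0.2 - q0.1) with ⟨he, h0⟩ | ⟨he, h0⟩ <;> omega⟩⟩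
      · exact ⟨q1, ⟨hq1, by rcases abs_cases (q1.2 - q1.1) with ⟨he, h0⟩ | ⟨he, h0⟩ <;> omega⟩⟩

-- A's append fold, from any accumulator, produces the two filters
lemma foldl_split (reports : List (List Int)) (acc1 acc2 : List (List Int)) :
    reports.foldl
      (fun acc report =>
        if is_report_safe report then (acc.1 ++ [report], acc.2) else (acc.1, acc.2 ++ [report]))
      (acc1, acc2)
    = (acc1 ++ reports.filter is_report_safe, acc2 ++ reports.filter (fun r => !is_report_safe r)) := by
  induction reports generalizing acc1 acc2 with
  | nil => simp
  | cons r rest ih =>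
    simp only [List.foldl_cons, List.filter_cons]
    by_cases hr : is_report_safe r = true
    · simp [hr, ih]
    · simp only [Bool.not_eq_true] at hr
      simp [hr, ih]

-- ===== VERDICT (by name: the statement is the Claim_ definition above) =====
theorem split_reports_spec : Claim_equal_split_reports := by
  intro reports _
  unfold Spec_split_reports split_reports split_reports_alt
  rw [foldl_split]
  simp only [List.nil_append]
  exact Prod.ext (List.filter_congr (fun r _ => safe_eq r))
    (List.filter_congr (fun r _ => by rw [safe_eq]))
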